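-- pv_equiv track=rewrite | github.com/mstang107/noq | solvers/tapa.py | parse_shading
-- ===== SOURCE A (Python) =====
-- def parse_shading(shading):
--     '''
--         Returns the Tapa clue that a ring of 8 cells
--         corresponds to, digits sorted in increasing order.
--         For example,
--             shading = [T,F,T,T,T,F,F,T]
--         should output [2, 3]. As a special case,
--         outputs [0] if shading is all False.
--     '''
--     if all(shading): # shading is all True
--         return [8]
--
--     # rotate so that the first spot is False
--     idx = shading.index(False)
--     shading = shading[idx:] + shading[:idx]
--
--     # now `clue` is the lengths of consecutive runs of `True` in shading
--     clue = []
--     curr_num = 0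
--     for b in shading:
--         if b: # shaded, add to shaded string
--             curr_num += 1
--         else: # unshaded, end current shaded string
--             if curr_num > 0:
--                 clue.append(curr_num)
--             curr_num = 0
--     if curr_num > 0: # add last string
--         clue.append(curr_num)
--
--     if clue == []:
--         clue = [0]
--     return sorted(clue)
-- ===== SOURCE B (Python) =====
-- def parse_shading(shading):
--     n = len(shading)
--     falses = [i for i, b in enumerate(shading) if not b]
--     if not falses:
--         return [8]
--     bounds = falses[1:] + [falses[0] + n]
--     runs = [q - p - 1 for p, q in zip(falses, bounds) if q - p - 1 > 0]
--     return sorted(runs) if runs else [0]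
-- ===== Notes on version B (the rewrite author's own statement) =====
-- stated objective: alternative
-- what changed: Instead of rotating the list to start at the first False and scanning it with a run-length accumulator, B collects the indices of all False cells in one enumerate pass and reads each True-run length off as the gap between cyclically consecutive False positions (the wrap run falling out of the falses[0]+n bound), so no rotated copy and no stateful run scan exist.
import Mathlib
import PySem

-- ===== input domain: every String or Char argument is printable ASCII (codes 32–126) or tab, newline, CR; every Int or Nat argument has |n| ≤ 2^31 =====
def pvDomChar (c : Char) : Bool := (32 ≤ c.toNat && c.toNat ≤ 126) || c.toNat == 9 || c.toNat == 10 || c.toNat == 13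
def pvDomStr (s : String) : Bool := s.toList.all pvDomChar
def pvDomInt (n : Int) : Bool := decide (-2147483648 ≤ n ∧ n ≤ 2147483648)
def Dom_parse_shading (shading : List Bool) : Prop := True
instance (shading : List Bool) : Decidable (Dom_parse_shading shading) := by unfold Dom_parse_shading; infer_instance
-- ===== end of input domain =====

-- B replaces A's rotate-then-scan run counting by one enumerate pass collecting the False
-- positions and reading run lengths off as gaps between cyclically consecutive False cells
-- (alternative decomposition, same asymptotic cost).

-- ===== PORT A =====
def parse_shading (shading : List Bool) : List Int :=
  if shading.all (fun b => b) then [8]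
  else
    match PySem.List.index? shading false with
    | none => []
    | some idx =>
      let rot := PySem.List.slice shading (some (idx : Int)) none
                 ++ PySem.List.slice shading none (some (idx : Int))
      let st := rot.foldl (fun (st : List Int × Int) b =>
          if b then (st.1, st.2 + 1)
          else (if st.2 > 0 then st.1 ++ [st.2] else st.1, 0)) ([], 0)
      let clue := if st.2 > 0 then st.1 ++ [st.2] else st.1
      let clue := if clue = [] then [0] else clue
      PySem.List.sorted clue (fun x => x) false


-- ===== PORT B =====
def parse_shading_alt (shading : List Bool) : List Int :=
  let n : Int := shading.length
  let falses := (PySem.List.enumerate shading 0).filterMap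
      (fun p => if p.2 = false then some p.1 else none)
  match falses with
  | [] => [8]
  | f0 :: _ =>
    let bounds := PySem.List.slice falses (some 1) none ++ [f0 + n]
    let runs := (falses.zip bounds).filterMap
        (fun pq => if pq.2 - pq.1 - 1 > 0 then some (pq.2 - pq.1 - 1) else none)
    if runs = [] then [0] else PySem.List.sorted runs (fun x => x) false


-- ===== PRECONDITION & SPEC =====
def Spec_parse_shading (shading : List Bool) (out : List Int) : Prop := out = parse_shading_alt shading
instance (shading : List Bool) (out : List Int) : Decidable (Spec_parse_shading shading out) := by unfold Spec_parse_shading; infer_instance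

-- ===== CLAIM (what is proved, stated in full; the proofs are below) =====
def Claim_equal_parse_shading : Prop := ∀ (shading : List Bool), Dom_parse_shading shading → Spec_parse_shading shading (parse_shading shading)

-- ===== LEMMAS AND PROOFS =====

-- run lengths of the maximal True-runs of l, with k Trues already pending
def pvG : List Bool → Int → List Int
  | [], k => if k > 0 then [k] else []
  | true :: t, k => pvG t (k + 1)
  | false :: t, k => (if k > 0 then [k] else []) ++ pvG t 0

def pvGaps : List Int → Int → List Int
  | [], _ => []
  | [f], E => if E - f - 1 > 0 then [E - f - 1] else []
  | f :: f' :: r, E => (if f' - f - 1 > 0 then [f' - f - 1] else []) ++ pvGaps (f' :: r) E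

def pvFalses (i : Int) : List Bool → List Int
  | [] => []
  | true :: t => pvFalses (i + 1) t
  | false :: t => i :: pvFalses (i + 1) t

theorem pvScan_eq (l : List Bool) : ∀ (c : List Int) (k : Int),
    (if (l.foldl (fun (st : List Int × Int) b =>
          if b then (st.1, st.2 + 1)
          else (if st.2 > 0 then st.1 ++ [st.2] else st.1, 0)) (c, k)).2 > 0
     then (l.foldl (fun (st : List Int × Int) b =>
          if b then (st.1, st.2 + 1)
          else (if st.2 > 0 then st.1 ++ [st.2] else st.1, 0)) (c, k)).1
          ++ [(l.foldl (fun (st : List Int × Int) b =>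
          if b then (st.1, st.2 + 1)
          else (if st.2 > 0 then st.1 ++ [st.2] else st.1, 0)) (c, k)).2]
     else (l.foldl (fun (st : List Int × Int) b =>
          if b then (st.1, st.2 + 1)
          else (if st.2 > 0 then st.1 ++ [st.2] else st.1, 0)) (c, k)).1)
    = c ++ pvG l k := by
  induction l with
  | nil => intro c k; simp only [List.foldl_nil, pvG]; split_ifs <;> simp
  | cons b t ih =>
    intro c k
    cases b with
    | true =>
      simp only [List.foldl_cons]
      exact ih c (k + 1)
    | false =>
      simp only [List.foldl_cons, Bool.false_eq_true, if_false]
      rw [ih (if k > 0 then c ++ [k] else c) 0, pvG]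
      split_ifs <;> simp

theorem pvFalses_enum (l : List Bool) : ∀ s : Int,
    (PySem.List.enumerate l s).filterMap (fun p => if p.2 = false then some p.1 else none)
      = pvFalses s l := by
  induction l with
  | nil => intro s; simp [PySem.List.enumerate_nil, pvFalses]
  | cons b t ih =>
    intro s
    cases b <;> simp [PySem.List.enumerate_cons, pvFalses, ih]

theorem pvZip_gaps (r : List Int) : ∀ (f E : Int),
    ((f :: r).zip (r ++ [E])).filterMap
        (fun pq => if pq.2 - pq.1 - 1 > 0 then some (pq.2 - pq.1 - 1) else none)
      = pvGaps (f :: r) E := by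
  induction r with
  | nil =>
    intro f E
    simp only [List.nil_append, List.zip_cons_cons, List.zip_nil_left, List.filterMap_cons,
      List.filterMap_nil, pvGaps]
    split_ifs <;> simp
  | cons f' r' ih =>
    intro f E
    simp only [List.cons_append, List.zip_cons_cons, List.filterMap_cons, ih f' E]
    rw [pvGaps]
    split_ifs <;> simp

theorem pvFalses_append (l₁ l₂ : List Bool) : ∀ i : Int,
    pvFalses i (l₁ ++ l₂) = pvFalses i l₁ ++ pvFalses (i + l₁.length) l₂ := by
  induction l₁ with
  | nil => intro i; simp [pvFalses]
  | cons b t ih =>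
    intro i
    cases b <;>
      simp only [List.cons_append, pvFalses, ih (i + 1), List.length_cons, List.cons_append] <;>
      rw [show i + 1 + (t.length : Int) = i + ((t.length : Int) + 1) by ring] <;>
      push_cast <;> ring_nf

theorem pvFalses_replicate_true (w : Nat) : ∀ i : Int, pvFalses i (List.replicate w true) = [] := by
  induction w with
  | zero => intro i; simp [pvFalses]
  | succ w ih => intro i; simp [List.replicate_succ, pvFalses, ih]

theorem pvG_replicate_true (w : Nat) : ∀ k : Int,
    pvG (List.replicate w true) k = if k + w > 0 then [k + w] else [] := by
  induction w with
  | zero => intro k; simp [pvG]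
  | succ w ih =>
    intro k
    rw [List.replicate_succ, pvG, ih (k + 1)]
    have hc : k + 1 + (w : Int) = k + ((w : Nat) + 1 : Nat) := by push_cast; ring
    rw [hc]

theorem pvGF (t : List Bool) : ∀ (w : Nat) (f i : Int),
    pvGaps (f :: pvFalses i t) (i + t.length + w)
      = pvG (t ++ List.replicate w true) (i - f - 1) := by
  induction t with
  | nil =>
    intro w f i
    rw [pvFalses, pvGaps, List.nil_append, pvG_replicate_true]
    have h1 : i + (([] : List Bool).length : Int) + w - f - 1 = i - f - 1 + w := by
      simp; ring
    rw [h1]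
  | cons b t ih =>
    intro w f i
    cases b with
    | true =>
      rw [pvFalses, List.cons_append, pvG,
        show i + (((true :: t).length : Nat) : Int) + w = (i + 1) + (t.length : Int) + w by
          simp [List.length_cons]; ring,
        ih w f (i + 1)]
      congr 1
      ring
    | false =>
      rw [pvFalses, pvGaps,
        show i + (((false :: t).length : Nat) : Int) + w = (i + 1) + (t.length : Int) + w by
          simp [List.length_cons]; ring,
        ih w i (i + 1), List.cons_append, pvG]
      congr 2
      ring

theorem pvFalses_nil_iff (l : List Bool) : ∀ i : Int, pvFalses i l = [] ↔ ∀ b ∈ l, b = true := by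
  induction l with
  | nil => intro i; simp [pvFalses]
  | cons b t ih =>
    intro i
    cases b <;> simp [pvFalses, ih (i + 1)]


-- ===== VERDICT (by name: the statement is the Claim_ definition above) =====
theorem parse_shading_spec : Claim_equal_parse_shading := by
  intro l _
  unfold Spec_parse_shading
  unfold parse_shading parse_shading_alt
  rw [pvFalses_enum l 0]
  by_cases hall : l.all (fun b => b) = true
  · rw [if_pos hall]
    have h0 : pvFalses 0 l = [] := (pvFalses_nil_iff l 0).2 (by simpa [List.all_eq_true] using hall)
    rw [h0]
  · rw [if_neg hall]
    have hmem : false ∈ l := by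
      rcases List.all_eq_false.1 (Bool.eq_false_iff.2 hall) with ⟨x, hx, hnx⟩
      cases x
      · exact hx
      · simp at hnx
    obtain ⟨idx, hidx⟩ := Option.isSome_iff_exists.1 ((PySem.List.index?_isSome_iff l false).2 hmem)
    obtain ⟨hk, hval, hmin⟩ := PySem.List.getElem_of_index?_eq_some hidx
    rw [hidx]
    have hdrop : l.drop idx = false :: l.drop (idx + 1) := by
      rw [List.drop_eq_getElem_cons hk, hval]
    have htake : l.take idx = List.replicate idx true := by
      apply List.ext_getElem
      · simp; omega
      · intro j h1 h2
        simp only [List.getElem_take, List.getElem_replicate]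
        have hj : j < idx := by simp at h1; omega
        have := hmin j hj
        simpa using this
    have hfl : pvFalses 0 l = (idx : Int) :: pvFalses ((idx : Int) + 1) (l.drop (idx + 1)) := by
      conv_lhs => rw [← List.take_append_drop idx l]
      rw [pvFalses_append, htake, pvFalses_replicate_true, List.nil_append, hdrop, pvFalses]
      congr 2 <;> simp
    simp only [PySem.List.slice_from_natCast, PySem.List.slice_to_natCast, hdrop, htake, hfl,
      PySem.List.slice_from_one, List.tail_cons]
    rw [pvScan_eq ((false :: l.drop (idx + 1)) ++ List.replicate idx true) [] 0]
    rw [pvZip_gaps (pvFalses ((idx : Int) + 1) (l.drop (idx + 1))) (idx : Int) ((idx : Int) + (l.length : Int))]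
    rw [show (idx : Int) + (l.length : Int)
          = ((idx : Int) + 1) + ((l.drop (idx + 1)).length : Int) + ((idx : Nat) : Int) by
        simp only [List.length_drop]; omega]
    rw [pvGF (l.drop (idx + 1)) idx (idx : Int) ((idx : Int) + 1)]
    rw [show ((idx : Int) + 1 - (idx : Int) - 1) = 0 by ring]
    rw [List.nil_append, List.cons_append, pvG,
      if_neg (by omega : ¬((0 : Int) > 0)), List.nil_append]
    by_cases hR : pvG (l.drop (idx + 1) ++ List.replicate idx true) 0 = []
    · rw [hR]
      rfl
    · rw [if_neg hR, if_neg hR]
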